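-- pv_equiv track=rewrite | github.com/RheaDutta/CDS-Training-Program | generate_matrix.py | reduced_matrix_helper2
-- ===== SOURCE A (Python) =====
-- def reduced_matrix_helper2(r_matrix):
-- 	"""
-- 	RETURNS: A compressed version of the reduced matrix where every tuple is in
-- 			the format (n, numerator, denominator). The number required is
-- 			[(numerator/denominator)*n].
-- 	"""
--
-- 	new_r_matrix = []
--
-- 	for row in r_matrix:
-- 		new_row = []
--
-- 		for tup in row:
--
-- 			n = tup[0]
-- 			prob_list = tup[1]
--
-- 			denominators = []
-- 			for prob in prob_list:
-- 				for p in prob: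
-- 					if p not in denominators and p!=0:
-- 						denominators.append(p)
--
-- 			denominator = 1
-- 			for m in denominators:
-- 				denominator = denominator*m
--
-- 			numerators = []
-- 			for prob in prob_list:
-- 				for p in prob:
-- 					if p!=0:
-- 						numerators.append(denominator//p)
--
-- 			numerator = sum(numerators)
--
-- 			new_tup = (n, numerator, denominator)
-- 			new_row.append(new_tup)
-- 		new_r_matrix.append(new_row)
--
-- 	return new_r_matrix
-- ===== SOURCE B (Python) =====
-- def reduced_matrix_helper2(r_matrix):
--     """
--     RETURNS: A compressed version of the reduced matrix where every tuple is in
--             the format (n, numerator, denominator). The number required is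
--             [(numerator/denominator)*n].
--     """
--     result = []
--     for row in r_matrix:
--         new_row = []
--         for n, prob_list in row:
--             # frequency table of the nonzero entries, built in one flattening pass
--             counts = {}
--             for prob in prob_list:
--                 for p in prob:
--                     if p != 0:
--                         counts[p] = counts.get(p, 0) + 1
--             denominator = 1
--             for v in counts:
--                 denominator = denominator * v
--             numerator = sum(c * (denominator // v) for v, c in counts.items())
--             new_row.append((n, numerator, denominator))
--         result.append(new_row)
--     return result
-- ===== Notes on version B (the rewrite author's own statement) =====
-- stated objective: alternative
-- what changed: B replaces A's dedup-list with membership scans and its per-occurrence numerator list by a single frequency table (dict counter): the denominator is the product over the table's keys and the numerator sums count*(denominator//value) over distinct values instead of one division per occurrence.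
import Mathlib
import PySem

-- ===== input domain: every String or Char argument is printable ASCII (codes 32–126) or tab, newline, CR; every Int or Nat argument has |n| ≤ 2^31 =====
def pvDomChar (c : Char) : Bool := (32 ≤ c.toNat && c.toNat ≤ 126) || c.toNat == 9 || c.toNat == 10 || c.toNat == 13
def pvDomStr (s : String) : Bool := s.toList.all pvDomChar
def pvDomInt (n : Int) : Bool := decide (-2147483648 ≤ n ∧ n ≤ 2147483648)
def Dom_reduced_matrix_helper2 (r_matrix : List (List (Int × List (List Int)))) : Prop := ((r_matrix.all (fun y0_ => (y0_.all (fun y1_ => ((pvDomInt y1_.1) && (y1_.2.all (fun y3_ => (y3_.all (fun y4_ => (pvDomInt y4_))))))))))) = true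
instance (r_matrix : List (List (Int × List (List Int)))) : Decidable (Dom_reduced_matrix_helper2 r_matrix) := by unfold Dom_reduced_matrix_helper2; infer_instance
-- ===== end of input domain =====

-- B replaces A's dedup-list membership scans and per-occurrence numerator list by one
-- frequency table (dict counter): denominator = product of its keys, numerator =
-- sum of count * (denominator // value) over distinct values. Objective: alternative.

-- ===== PORT A =====
def reduced_matrix_helper2 (r_matrix : List (List (Int × List (List Int)))) : List (List (Int × Int × Int)) :=
  r_matrix.foldl (fun new_r_matrix row =>
    new_r_matrix ++ [row.foldl (fun new_row tup =>
      let n := tup.1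
      let prob_list := tup.2
      let denominators := prob_list.foldl (fun den prob =>
        prob.foldl (fun den p => if !den.contains p && p != 0 then den ++ [p] else den) den) ([] : List Int)
      let denominator := denominators.foldl (fun d m => d * m) (1 : Int)
      let numerators := prob_list.foldl (fun num prob =>
        prob.foldl (fun num p => if p != 0 then num ++ [PySem.Int.floordiv denominator p] else num) num) ([] : List Int)
      let numerator := numerators.sum
      new_row ++ [(n, numerator, denominator)]) []]) []

-- ===== PORT B =====
def reduced_matrix_helper2_alt (r_matrix : List (List (Int × List (List Int)))) : List (List (Int × Int × Int)) :=
  r_matrix.foldl (fun result row =>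
    result ++ [row.foldl (fun new_row tup =>
      let n := tup.1
      let prob_list := tup.2
      let counts := prob_list.foldl (fun d prob =>
        prob.foldl (fun d p => if p != 0 then d.insert p (d.getD p 0 + 1) else d) d)
        (PySem.Dict.empty : PySem.Dict Int Int)
      let denominator := counts.keys.foldl (fun d v => d * v) (1 : Int)
      let numerator := (counts.items.map (fun vc => vc.2 * PySem.Int.floordiv denominator vc.1)).sum
      new_row ++ [(n, numerator, denominator)]) []]) []

-- ===== PRECONDITION & SPEC =====
def Spec_reduced_matrix_helper2 (r_matrix : List (List (Int × List (List Int)))) (out : List (List (Int × Int × Int))) : Prop := out = reduced_matrix_helper2_alt r_matrix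
instance (r_matrix : List (List (Int × List (List Int)))) (out : List (List (Int × Int × Int))) : Decidable (Spec_reduced_matrix_helper2 r_matrix out) := by unfold Spec_reduced_matrix_helper2; infer_instance

-- ===== CLAIM (what is proved, stated in full; the proofs are below) =====
def Claim_equal_reduced_matrix_helper2 : Prop := ∀ (r_matrix : List (List (Int × List (List Int)))), Dom_reduced_matrix_helper2 r_matrix → Spec_reduced_matrix_helper2 r_matrix (reduced_matrix_helper2 r_matrix)

-- ===== LEMMAS AND PROOFS =====

-- A's dedup loop builds exactly PySem.Set.ofList of the flattened nonzero entries.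
lemma denomsA_eq (pl : List (List Int)) :
    pl.foldl (fun den prob =>
      prob.foldl (fun den p => if !den.contains p && p != 0 then den ++ [p] else den) den) ([] : List Int)
    = PySem.Set.ofList (pl.flatten.filter (fun p => p != 0)) := by
  rw [← List.foldl_flatten]
  show _ = (pl.flatten.filter (fun p => p != 0)).foldl PySem.Set.add []
  rw [List.foldl_filter]
  have hf : (fun (den : List Int) p => if !den.contains p && p != 0 then den ++ [p] else den)
      = (fun (den : List Int) p => if (p != 0) = true then PySem.Set.add den p else den) := by
    funext den p
    simp only [PySem.Set.add]
    by_cases hc : den.contains p <;> by_cases hp : (p != 0) = true <;> simp [hp]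
  rw [hf]

-- B's counting loop builds exactly the counter of the flattened nonzero entries.
lemma countsB_eq (pl : List (List Int)) :
    pl.foldl (fun d prob =>
      prob.foldl (fun d p => if p != 0 then d.insert p (d.getD p 0 + 1) else d) d)
      (PySem.Dict.empty : PySem.Dict Int Int)
    = PySem.Dict.counter (pl.flatten.filter (fun p => p != 0)) := by
  rw [← List.foldl_flatten, ← PySem.Dict.foldl_insert_getD_add_one_eq_counter, List.foldl_filter]

-- A's numerator loop lists denominator // p for every nonzero occurrence.
lemma numsA_eq (pl : List (List Int)) (D : Int) :
    pl.foldl (fun num prob =>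
      prob.foldl (fun num p => if p != 0 then num ++ [PySem.Int.floordiv D p] else num) num) ([] : List Int)
    = (pl.flatten.filter (fun p => p != 0)).map (fun p => PySem.Int.floordiv D p) := by
  rw [← List.foldl_flatten, PySem.List.foldl_append_if (fun p => p != 0) (fun p => PySem.Int.floordiv D p)]
  simp

-- Grouping a sum by value: summing f over a list equals summing count * f over its distinct values.
lemma sum_count_group (L : List Int) (f : Int → Int) :
    (L.map f).sum = ((PySem.Set.ofList L).map (fun v => (L.count v : Int) * f v)).sum := by
  have hnd : (PySem.Set.ofList L).Nodup := PySem.Set.nodup_ofList L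
  have hfin : (PySem.Set.ofList L).toFinset = L.toFinset := by
    apply Finset.ext; intro v
    simp [List.mem_toFinset, PySem.Set.mem_ofList]
  calc (L.map f).sum
      = ∑ v ∈ L.toFinset, L.count v • f v := by
        simpa using Finset.sum_multiset_map_count (↑L : Multiset Int) f
    _ = ∑ v ∈ (PySem.Set.ofList L).toFinset, (L.count v : Int) * f v := by
        rw [hfin]; exact Finset.sum_congr rfl (fun v _ => by simp)
    _ = _ := List.sum_toFinset _ hnd

-- The per-tuple values agree.
lemma tuple_eq (tup : Int × List (List Int)) :
    (let n := tup.1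
     let prob_list := tup.2
     let denominators := prob_list.foldl (fun den prob =>
       prob.foldl (fun den p => if !den.contains p && p != 0 then den ++ [p] else den) den) ([] : List Int)
     let denominator := denominators.foldl (fun d m => d * m) (1 : Int)
     let numerators := prob_list.foldl (fun num prob =>
       prob.foldl (fun num p => if p != 0 then num ++ [PySem.Int.floordiv denominator p] else num) num) ([] : List Int)
     let numerator := numerators.sum
     (n, numerator, denominator))
    = (let n := tup.1
       let prob_list := tup.2
       let counts := prob_list.foldl (fun d prob =>
         prob.foldl (fun d p => if p != 0 then d.insert p (d.getD p 0 + 1) else d) d)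
         (PySem.Dict.empty : PySem.Dict Int Int)
       let denominator := counts.keys.foldl (fun d v => d * v) (1 : Int)
       let numerator := (counts.items.map (fun vc => vc.2 * PySem.Int.floordiv denominator vc.1)).sum
       (n, numerator, denominator)) := by
  simp only [denomsA_eq, countsB_eq, numsA_eq, PySem.Dict.keys_counter, PySem.Dict.items_counter,
    List.map_map]
  refine Prod.ext rfl (Prod.ext ?_ rfl)
  exact sum_count_group _ _

-- ===== VERDICT (by name: the statement is the Claim_ definition above) =====
theorem reduced_matrix_helper2_spec : Claim_equal_reduced_matrix_helper2 := by
  intro r _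
  unfold Spec_reduced_matrix_helper2 reduced_matrix_helper2 reduced_matrix_helper2_alt
  rw [PySem.List.foldl_append_singleton_eq_map, PySem.List.foldl_append_singleton_eq_map]
  simp only [List.nil_append]
  refine List.map_congr_left (fun row _ => ?_)
  rw [PySem.List.foldl_append_singleton_eq_map, PySem.List.foldl_append_singleton_eq_map]
  simp only [List.nil_append]
  exact List.map_congr_left (fun tup _ => tuple_eq tup)
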